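-- pv_equiv track=rewrite | github.com/le-eug/MATH3411 | test1/ISBN_correction.py | calculate_isbn_trial_sum
-- ===== SOURCE A (Python) =====
-- def calculate_isbn_trial_sum(isbn: str, err_posn: int, trial_digit: int) -> int:
--     total: int = 0
--     for i, ch in enumerate(isbn):
--         if i == err_posn - 1:
--             total += (i + 1) * trial_digit
--         else:
--             if ch == 'X' or ch == 'x':
--                 total += (i + 1) * 10
--             else:
--                 total += (i + 1) * int(ch)
--     return total
-- ===== SOURCE B (Python) =====
-- def calculate_isbn_trial_sum(isbn: str, err_posn: int, trial_digit: int) -> int: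
--     def val(ch: str) -> int:
--         return 10 if ch in 'Xx' else int(ch)
--     chars = list(isbn)
--     if 1 <= err_posn <= len(chars):
--         p = err_posn - 1
--         patched = chars[:p] + ['0'] + chars[p + 1:]
--         return sum((i + 1) * val(ch) for i, ch in enumerate(patched)) + err_posn * trial_digit
--     return sum((i + 1) * val(ch) for i, ch in enumerate(chars))
-- ===== Notes on version B (the rewrite author's own statement) =====
-- stated objective: alternative
-- what changed: B removes A's per-iteration error-position branch: it patches the error position with '0', computes one unconditional weighted sum, and adds the err_posn*trial_digit term once at the end (only when err_posn is in range).
import Mathlib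
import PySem

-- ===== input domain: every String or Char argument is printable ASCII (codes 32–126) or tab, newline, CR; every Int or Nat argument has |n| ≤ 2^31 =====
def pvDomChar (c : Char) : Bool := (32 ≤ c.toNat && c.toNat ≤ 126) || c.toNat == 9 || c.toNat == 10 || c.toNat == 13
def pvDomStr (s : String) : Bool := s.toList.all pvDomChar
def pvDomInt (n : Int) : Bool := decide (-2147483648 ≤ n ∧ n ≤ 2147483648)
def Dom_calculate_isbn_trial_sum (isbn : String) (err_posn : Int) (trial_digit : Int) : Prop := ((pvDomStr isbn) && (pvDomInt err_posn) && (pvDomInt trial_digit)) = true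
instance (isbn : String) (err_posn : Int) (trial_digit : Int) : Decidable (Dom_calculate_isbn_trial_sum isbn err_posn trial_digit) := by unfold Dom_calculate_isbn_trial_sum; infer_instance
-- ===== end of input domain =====

-- B replaces A's per-iteration error-position branch by one unconditional weighted sum
-- over the string with the error position patched to '0', plus a single err_posn*trial_digit term.

-- int(ch) for a single character; the .getD 0 arm is unreachable under Pre_ (Python raises ValueError there)
def pvIntCh (c : Char) : Int := (PySem.Int.ofStr? (String.ofList [c])).getD 0

-- ===== PORT A =====
-- the for-loop of A as structural recursion over the characters, carrying index i and total
def pvLoopA : List Char → Nat → Int → Int → Int → Int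
  | [], _, _, _, total => total
  | c :: rest, i, err_posn, trial_digit, total =>
    pvLoopA rest (i + 1) err_posn trial_digit
      (if (i : Int) = err_posn - 1 then total + ((i : Int) + 1) * trial_digit
       else if c = 'X' ∨ c = 'x' then total + ((i : Int) + 1) * 10
       else total + ((i : Int) + 1) * pvIntCh c)

def calculate_isbn_trial_sum (isbn : String) (err_posn : Int) (trial_digit : Int) : Int :=
  pvLoopA isbn.toList 0 err_posn trial_digit 0

-- ===== PORT B =====
-- val(ch) of Source B
def pvVal (c : Char) : Int := if c = 'X' ∨ c = 'x' then 10 else pvIntCh c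

-- the branch-free weighted sum of Source B (sum((i+1)*val(ch) for i,ch in enumerate(...)))
def pvWsum : List Char → Nat → Int → Int
  | [], _, acc => acc
  | c :: rest, i, acc => pvWsum rest (i + 1) (acc + ((i : Int) + 1) * pvVal c)

def calculate_isbn_trial_sum_alt (isbn : String) (err_posn : Int) (trial_digit : Int) : Int :=
  let chars := isbn.toList
  if 1 ≤ err_posn ∧ err_posn ≤ (chars.length : Int) then
    -- chars[:p] + ['0'] + chars[p+1:] : exact as take/drop since here 0 ≤ p < len
    let p := (err_posn - 1).toNat
    pvWsum (chars.take p ++ '0' :: chars.drop (p + 1)) 0 0 + err_posn * trial_digit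
  else
    pvWsum chars 0 0

-- ===== PRECONDITION & SPEC =====
-- Pre_: exactly where Python A returns: every character is a digit or 'X'/'x',
-- except the substituted position err_posn-1, which may hold anything (A never reads it).
def Pre_calculate_isbn_trial_sum (isbn : String) (err_posn : Int) (_trial_digit : Int) : Prop :=
  ∀ pr ∈ PySem.List.enumerate isbn.toList, pr.1 = err_posn - 1 ∨ pr.2.isDigit ∨ pr.2 = 'X' ∨ pr.2 = 'x'
instance (isbn : String) (err_posn : Int) (trial_digit : Int) : Decidable (Pre_calculate_isbn_trial_sum isbn err_posn trial_digit) := by unfold Pre_calculate_isbn_trial_sum; infer_instance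

def pvWitness_calculate_isbn_trial_sum : String × Int × Int := ("030640615X", 3, 7)

def Spec_calculate_isbn_trial_sum (isbn : String) (err_posn : Int) (trial_digit : Int) (out : Int) : Prop := out = calculate_isbn_trial_sum_alt isbn err_posn trial_digit
instance (isbn : String) (err_posn : Int) (trial_digit : Int) (out : Int) : Decidable (Spec_calculate_isbn_trial_sum isbn err_posn trial_digit out) := by unfold Spec_calculate_isbn_trial_sum; infer_instance

-- ===== CLAIM (what is proved, stated in full; the proofs are below) =====
def Claim_equal_calculate_isbn_trial_sum : Prop := ∀ (isbn : String) (err_posn : Int) (trial_digit : Int), Dom_calculate_isbn_trial_sum isbn err_posn trial_digit → Pre_calculate_isbn_trial_sum isbn err_posn trial_digit → Spec_calculate_isbn_trial_sum isbn err_posn trial_digit (calculate_isbn_trial_sum isbn err_posn trial_digit)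

-- ===== LEMMAS AND PROOFS =====

-- accumulator of pvWsum factors out
theorem pvWsum_acc (l : List Char) : ∀ (i : Nat) (acc : Int), pvWsum l i acc = acc + pvWsum l i 0 := by
  induction l with
  | nil => intro i acc; simp [pvWsum]
  | cons c rest ih =>
    intro i acc
    simp only [pvWsum]
    rw [ih (i + 1) (acc + ((i : Int) + 1) * pvVal c), ih (i + 1) (0 + ((i : Int) + 1) * pvVal c)]
    ring

-- when no index of the suffix equals err_posn - 1, A's loop is the branch-free weighted sum
theorem pvLoopA_out (l : List Char) : ∀ (i : Nat) (err_posn trial_digit acc : Int),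
    (∀ j : Nat, i ≤ j → j < i + l.length → (j : Int) ≠ err_posn - 1) →
    pvLoopA l i err_posn trial_digit acc = pvWsum l i acc := by
  induction l with
  | nil => intro i e t acc _; rfl
  | cons c rest ih =>
    intro i e t acc h
    have hi : (i : Int) ≠ e - 1 := h i le_rfl (by simp)
    simp only [pvLoopA, pvWsum, if_neg hi]
    rw [ih (i + 1) e t _ (by intro j h1 h2; exact h j (by omega) (by simp at h2 ⊢; omega))]
    congr 1
    unfold pvVal
    split_ifs <;> ring

-- the in-range case: error position p steps ahead of index i
theorem pvLoopA_in : ∀ (p : Nat) (l : List Char) (i : Nat) (trial_digit acc : Int), p < l.length →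
    pvLoopA l i ((i + p + 1 : Nat) : Int) trial_digit acc
      = pvWsum (l.take p ++ '0' :: l.drop (p + 1)) i acc + ((i + p + 1 : Nat) : Int) * trial_digit := by
  intro p
  induction p with
  | zero =>
    intro l i t acc hlen
    match l with
    | c :: rest =>
      have hcond : (i : Int) = ((i + 0 + 1 : Nat) : Int) - 1 := by push_cast; ring
      simp only [pvLoopA, pvWsum, if_pos hcond, List.take_zero, List.drop_succ_cons,
        List.drop_zero, List.nil_append]
      rw [pvLoopA_out rest (i + 1) _ t _ (by intro j h1 h2; push_cast; omega)]
      have hv : pvVal '0' = 0 := by decide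
      rw [hv, pvWsum_acc rest (i + 1) (acc + ((i : Int) + 1) * t),
          pvWsum_acc rest (i + 1) (acc + ((i : Int) + 1) * 0)]
      push_cast; ring
  | succ p ih =>
    intro l i t acc hlen
    match l with
    | c :: rest =>
      have hcond : (i : Int) ≠ ((i + (p + 1) + 1 : Nat) : Int) - 1 := by push_cast; omega
      simp only [pvLoopA, pvWsum, if_neg hcond, List.take_succ_cons, List.drop_succ_cons,
        List.cons_append]
      have hcast : ((i + (p + 1) + 1 : Nat) : Int) = (((i + 1) + p + 1 : Nat) : Int) := by
        push_cast; ring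
      rw [hcast, ih rest (i + 1) t _ (by simpa using Nat.lt_of_succ_lt_succ hlen)]
      congr 2
      unfold pvVal
      split_ifs <;> ring

-- ===== VERDICT (by name: the statement is the Claim_ definition above) =====
theorem calculate_isbn_trial_sum_spec : Claim_equal_calculate_isbn_trial_sum := by
  intro isbn err_posn trial_digit _ _
  unfold Spec_calculate_isbn_trial_sum calculate_isbn_trial_sum calculate_isbn_trial_sum_alt
  by_cases h : 1 ≤ err_posn ∧ err_posn ≤ (isbn.toList.length : Int)
  · rw [if_pos h]
    show pvLoopA isbn.toList 0 err_posn trial_digit 0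
        = pvWsum (isbn.toList.take (err_posn - 1).toNat ++
            '0' :: isbn.toList.drop ((err_posn - 1).toNat + 1)) 0 0 + err_posn * trial_digit
    have hplen : (err_posn - 1).toNat < isbn.toList.length := by omega
    have := pvLoopA_in (err_posn - 1).toNat isbn.toList 0 trial_digit 0 hplen
    rw [show ((0 + (err_posn - 1).toNat + 1 : Nat) : Int) = err_posn from by push_cast; omega] at this
    exact this
  · rw [if_neg h]
    exact pvLoopA_out isbn.toList 0 err_posn trial_digit 0 (by intro j h1 h2; omega)
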